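-- pv_equiv track=rewrite | github.com/Teemy17/Learning | Intro computer programming/prac/lmao.py | count_operands_in_expr
-- ===== SOURCE A (Python) =====
-- def count_operands_in_expr(expr):
--     operands = ["+", "-", "*", "/", "%", "**", "//"]
--     expr = str(expr)
--     if not expr:
--         return 0
--     else:
--         operand = count_operands_in_expr(expr[1:])
--         if expr[0] in operands:
--             return operand + 1
--         else:
--             return operand
-- ===== SOURCE B (Python) =====
-- def count_operands_in_expr(expr):
--     expr = str(expr)
--     return sum(1 for c in expr if c in "+-*/%")
-- ===== Notes on version B (the rewrite author's own statement) =====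
-- stated objective: faster
-- what changed: Replaced the character-by-character recursion (which copies the remaining string on every call and risks RecursionError on long inputs) with a single linear filter-and-count pass over the characters against the one-character operator set; the two-character entries in A's operator list are inert since a single character can never equal them.
import Mathlib
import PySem

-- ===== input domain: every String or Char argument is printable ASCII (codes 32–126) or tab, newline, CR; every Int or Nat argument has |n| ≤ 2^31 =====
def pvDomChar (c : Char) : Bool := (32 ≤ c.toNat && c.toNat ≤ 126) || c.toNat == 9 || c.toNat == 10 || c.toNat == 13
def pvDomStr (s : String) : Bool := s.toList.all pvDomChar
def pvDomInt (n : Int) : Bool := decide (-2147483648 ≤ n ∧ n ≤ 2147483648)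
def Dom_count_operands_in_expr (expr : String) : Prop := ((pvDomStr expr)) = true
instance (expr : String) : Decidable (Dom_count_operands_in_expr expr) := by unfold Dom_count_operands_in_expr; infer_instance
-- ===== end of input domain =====

-- B replaces A's slice-and-recurse character count with one linear filter pass (idiomatic; same result).

-- ===== PORT A =====
-- A recurses on expr[1:] and tests the 1-char string expr[0] for membership in the operand list
-- (the 2-char entries "**" and "//" can never equal a 1-char string; the port keeps them).
def pvCountRecA : List Char → Int
  | [] => 0
  | c :: rest =>
    let operand := pvCountRecA rest
    if (String.ofList [c]) ∈ (["+", "-", "*", "/", "%", "**", "//"] : List String) then operand + 1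
    else operand

def count_operands_in_expr (expr : String) : Int := pvCountRecA expr.toList

-- ===== PORT B =====
-- B: sum(1 for c in expr if c in "+-*/%") — one pass, filter-and-count.
def count_operands_in_expr_alt (expr : String) : Int :=
  ((expr.toList.filter (fun c => c ∈ ("+-*/%" : String).toList)).length : Int)

-- ===== PRECONDITION & SPEC =====
def Spec_count_operands_in_expr (expr : String) (out : Int) : Prop := out = count_operands_in_expr_alt expr
instance (expr : String) (out : Int) : Decidable (Spec_count_operands_in_expr expr out) := by unfold Spec_count_operands_in_expr; infer_instance

-- ===== CLAIM (what is proved, stated in full; the proofs are below) =====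
def Claim_equal_count_operands_in_expr : Prop := ∀ (expr : String), Dom_count_operands_in_expr expr → Spec_count_operands_in_expr expr (count_operands_in_expr expr)

-- ===== LEMMAS AND PROOFS =====
theorem pvMemIff (c : Char) :
    ((String.ofList [c]) ∈ (["+", "-", "*", "/", "%", "**", "//"] : List String)) ↔
    (c ∈ ("+-*/%" : String).toList) := by
  simp [String.ext_iff]

theorem pvCountRecA_eq (l : List Char) :
    pvCountRecA l = ((l.filter (fun c => c ∈ ("+-*/%" : String).toList)).length : Int) := by
  induction l with
  | nil => simp [pvCountRecA]
  | cons c rest ih =>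
    rw [pvCountRecA, ih, List.filter_cons]
    by_cases h : c ∈ ("+-*/%" : String).toList
    · have h' : c = '+' ∨ c = '-' ∨ c = '*' ∨ c = '/' ∨ c = '%' := by simpa using h
      rw [if_pos ((pvMemIff c).mpr h)]
      simp [h']
    · have h' : ¬(c = '+' ∨ c = '-' ∨ c = '*' ∨ c = '/' ∨ c = '%') := by simpa using h
      rw [if_neg (fun hm => h ((pvMemIff c).mp hm))]
      simp [h']

-- ===== VERDICT (by name: the statement is the Claim_ definition above) =====
theorem count_operands_in_expr_spec : Claim_equal_count_operands_in_expr := by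
  intro expr _
  unfold Spec_count_operands_in_expr count_operands_in_expr count_operands_in_expr_alt
  exact pvCountRecA_eq expr.toList
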